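-- pv_equiv track=rewrite | github.com/luutuntin/Cinderella | semaland_anaphora_resolution.py | get_coref_nodes
-- ===== SOURCE A (Python) =====
-- def get_coref_nodes(text,i,n,link_dict):
--     """ """
--     output = list()
--     if (i in link_dict) and \
--        (n in link_dict[i]) and \
--        len(link_dict[i][n])==1:
--         ante = link_dict[i][n][0][1:]
--         output.append(ante)
--         output.extend(get_coref_nodes(text,ante[0],ante[1],link_dict))
--     return output
-- ===== SOURCE B (Python) =====
-- def get_coref_nodes(text, i, n, link_dict):
--     """Iterative version: follow the coreference link chain with a while loop."""
--     output = []
--     while i in link_dict and n in link_dict[i] and len(link_dict[i][n]) == 1: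
--         ante = link_dict[i][n][0][1:]
--         output.append(ante)
--         i, n = ante[0], ante[1]
--     return output
-- ===== Notes on version B (the rewrite author's own statement) =====
-- stated objective: idiomatic
-- what changed: The link-chain recursion is rewritten as an iterative while-loop that threads the current (i, n) coordinates and an output accumulator instead of building the result through recursive calls.
import Mathlib
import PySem

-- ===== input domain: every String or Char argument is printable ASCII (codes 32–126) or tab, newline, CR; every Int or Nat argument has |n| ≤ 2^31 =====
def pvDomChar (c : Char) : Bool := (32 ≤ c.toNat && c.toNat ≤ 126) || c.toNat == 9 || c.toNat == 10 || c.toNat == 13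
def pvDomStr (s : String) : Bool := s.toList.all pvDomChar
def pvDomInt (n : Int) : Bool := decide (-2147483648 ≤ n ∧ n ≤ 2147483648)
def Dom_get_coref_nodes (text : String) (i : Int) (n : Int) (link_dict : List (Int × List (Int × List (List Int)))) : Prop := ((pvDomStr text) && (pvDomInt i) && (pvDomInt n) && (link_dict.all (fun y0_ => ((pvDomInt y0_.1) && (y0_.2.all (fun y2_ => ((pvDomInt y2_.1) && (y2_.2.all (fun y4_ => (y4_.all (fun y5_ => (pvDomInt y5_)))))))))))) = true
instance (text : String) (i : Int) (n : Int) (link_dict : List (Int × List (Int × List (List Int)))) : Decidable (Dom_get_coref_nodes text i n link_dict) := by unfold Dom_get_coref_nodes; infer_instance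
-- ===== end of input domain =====

-- B rewrites A's link-chain recursion as an iterative accumulator loop (same cost, more idiomatic).


-- Association-list lookup (Python dict access, first match); shared by both ports.
def pvLookup {α : Type} (d : List (Int × α)) (k : Int) : Option α :=
  (d.find? (fun p => p.1 == k)).map (·.2)

-- Fuel bound: a terminating chain fires at most once per (outer key, inner key) pair,
-- so the total number of inner entries plus one bounds its length.
def pvFuel (d : List (Int × List (Int × List (List Int)))) : Nat :=
  (d.map (fun p => p.2.length)).sum + 1

-- ===== PORT A =====
-- A's recursion, step for step: test the link conditions in order, take ante = link[1:],
-- prepend it and recurse on (ante[0], ante[1]).  The fuel only totalises the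
-- recursion; inside Pre_ it never runs out.
def pvGoA (d : List (Int × List (Int × List (List Int)))) :
    Nat → Int → Int → List (List Int)
  | 0, _, _ => []
  | fuel + 1, i, n =>
    match pvLookup d i with
    | none => []
    | some inner =>
      match pvLookup inner n with
      | none => []
      | some ls =>
        if ls.length = 1 then
          let ante := (ls.headD []).drop 1
          match ante with
          | a0 :: a1 :: _ => ante :: pvGoA d fuel a0 a1
          | _ => [ante]   -- Python raises IndexError here (ante[0]); excluded by Pre_
        else []

def get_coref_nodes (text : String) (i : Int) (n : Int) (link_dict : List (Int × List (Int × List (List Int)))) : List (List Int) :=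
  pvGoA link_dict (pvFuel link_dict) i n

-- ===== PORT B =====
-- Source B's while-loop guard: returns the antecedent coordinates `ante` when the
-- guard holds, none when the loop exits.
def pvStepB (d : List (Int × List (Int × List (List Int))))
    (i n : Int) : Option (List Int) :=
  (pvLookup d i).bind fun inner =>
    (pvLookup inner n).bind fun ls =>
      if ls.length = 1 then some ((ls.headD []).drop 1) else none

-- Source B's while loop: thread (i, n) and the growing output list through a tail call.
def pvLoopB (d : List (Int × List (Int × List (List Int)))) :
    Nat → Int → Int → List (List Int) → List (List Int)
  | 0, _, _, acc => acc
  | fuel + 1, i, n, acc =>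
    match pvStepB d i n with
    | none => acc
    | some ante =>
      match ante with
      | a0 :: a1 :: _ => pvLoopB d fuel a0 a1 (acc ++ [ante])
      | _ => acc ++ [ante]   -- Python raises IndexError at `i, n = ante[0], ante[1]`; excluded by Pre_
  termination_by fuel => fuel

def get_coref_nodes_alt (text : String) (i : Int) (n : Int) (link_dict : List (Int × List (Int × List (List Int)))) : List (List Int) :=
  pvLoopB link_dict (pvFuel link_dict) i n []

-- ===== PRECONDITION & SPEC =====
-- Pre_ holds exactly when Python A returns: the antecedent chain from (i, n) is
-- finite (no cycle — on a cycle A hits RecursionError) and every fired link has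
-- at least three components (otherwise ante[0]/ante[1] raises IndexError).
-- A finite chain fires ≤ (number of inner entries) times, so pvFuel steps decide this.
def pvChainOk (d : List (Int × List (Int × List (List Int)))) :
    Nat → Int → Int → Bool
  | 0, _, _ => false
  | fuel + 1, i, n =>
    match pvLookup d i with
    | none => true
    | some inner =>
      match pvLookup inner n with
      | none => true
      | some ls =>
        if ls.length = 1 then
          match (ls.headD []).drop 1 with
          | a0 :: a1 :: _ => pvChainOk d fuel a0 a1
          | _ => false
        else true

def Pre_get_coref_nodes (text : String) (i : Int) (n : Int) (link_dict : List (Int × List (Int × List (List Int)))) : Prop :=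
  pvChainOk link_dict (pvFuel link_dict) i n = true

instance (text : String) (i : Int) (n : Int) (link_dict : List (Int × List (Int × List (List Int)))) : Decidable (Pre_get_coref_nodes text i n link_dict) := by unfold Pre_get_coref_nodes; infer_instance

def pvWitness_get_coref_nodes : String × Int × Int × (List (Int × List (Int × List (List Int)))) :=
  ("", 1, 2, [(1, [(2, [[9, 3, 4]])]), (3, [(4, [[8, 7, 7]])])])

def Spec_get_coref_nodes (text : String) (i : Int) (n : Int) (link_dict : List (Int × List (Int × List (List Int)))) (out : List (List Int)) : Prop := out = get_coref_nodes_alt text i n link_dict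
instance (text : String) (i : Int) (n : Int) (link_dict : List (Int × List (Int × List (List Int)))) (out : List (List Int)) : Decidable (Spec_get_coref_nodes text i n link_dict out) := by unfold Spec_get_coref_nodes; infer_instance

-- ===== CLAIM (what is proved, stated in full; the proofs are below) =====
def Claim_equal_get_coref_nodes : Prop := ∀ (text : String) (i : Int) (n : Int) (link_dict : List (Int × List (Int × List (List Int)))), Dom_get_coref_nodes text i n link_dict → Pre_get_coref_nodes text i n link_dict → Spec_get_coref_nodes text i n link_dict (get_coref_nodes text i n link_dict)

-- ===== LEMMAS AND PROOFS =====
-- Loop invariant: B's accumulator loop is A's recursion with the output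
-- appended behind the accumulator (holds for every fuel, no Pre_ needed).
theorem pv_loop_eq_goA (d : List (Int × List (Int × List (List Int))))
    (fuel : Nat) (i n : Int) (acc : List (List Int)) :
    pvLoopB d fuel i n acc = acc ++ pvGoA d fuel i n := by
  induction fuel generalizing i n acc with
  | zero => simp [pvLoopB, pvGoA]
  | succ f ih =>
    simp only [pvLoopB, pvStepB,
      pvGoA]
    cases hi : pvLookup d i with
    | none => simp
    | some inner =>
      simp only [Option.bind_some]
      cases hn : pvLookup inner n with
      | none => simp [hn]
      | some ls =>
        simp only [hn, Option.bind_some]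
        by_cases h : ls.length = 1
        · simp only [if_pos h]
          cases hante : (ls.headD []).drop 1 with
          | nil => simp [hante]
          | cons a0 tl =>
            cases tl with
            | nil => simp [hante]
            | cons a1 tl' => simp [hante, ih]
        · simp [h]

-- ===== VERDICT (by name: the statement is the Claim_ definition above) =====
theorem get_coref_nodes_spec : Claim_equal_get_coref_nodes := by
  intro text i n d _ _
  unfold Spec_get_coref_nodes get_coref_nodes get_coref_nodes_alt
  rw [pv_loop_eq_goA]
  simp
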